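-- pv_equiv track=rewrite | github.com/khairulwarahussain251203-max/Context-Aware-Chatbot-Using-LangChain-or-RAG | hf_inference_llm.py | _collapse_exact_repeated_prefixes
-- ===== SOURCE A (Python) =====
-- def _collapse_exact_repeated_prefixes(text: str, min_half: int = 24) -> str:
--     """If output is `chunk + chunk + ...`, keep a single chunk (greedy LM loops)."""
--     t = text.strip()
--     while True:
--         n = len(t)
--         if n < min_half * 2:
--             break
--         found = False
--         for half in range(n // 2, min_half - 1, -1):
--             if t[:half] == t[half : 2 * half]:
--                 t = (t[:half] + t[2 * half :]).strip()
--                 found = True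
--                 break
--         if not found:
--             break
--     return t
-- ===== SOURCE B (Python) =====
-- def _collapse_exact_repeated_prefixes(text: str, min_half: int = 24) -> str:
--     """If output is `chunk + chunk + ...`, keep a single chunk (greedy LM loops)."""
--     t = text.strip()
--     while True:
--         n = len(t)
--         if n < min_half * 2:
--             break
--         # Z-function: z[i] = length of the longest common prefix of t and t[i:].
--         z = [0]
--         l = r = 0
--         for i in range(1, n):
--             zi = min(r - i, z[i - l]) if i < r else 0
--             while i + zi < n and t[zi] == t[i + zi]:
--                 zi += 1
--             z.append(zi)
--             if i + zi > r:
--                 l, r = i, i + zi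
--         # t[:h] == t[h:2*h] iff z[h] >= h; pick the largest such half.
--         best = 0
--         for half in range(min_half, n // 2 + 1):
--             if z[half] >= half:
--                 best = half
--         if best == 0:
--             break
--         t = (t[:best] + t[2 * best :]).strip()
--     return t
-- ===== Notes on version B (the rewrite author's own statement) =====
-- stated objective: faster
-- what changed: Each round finds the largest collapsible half with one Z-function pass (t[:h]==t[h:2h] iff z[h]>=h) instead of re-comparing a pair of slices for every candidate half.
import Mathlib
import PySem

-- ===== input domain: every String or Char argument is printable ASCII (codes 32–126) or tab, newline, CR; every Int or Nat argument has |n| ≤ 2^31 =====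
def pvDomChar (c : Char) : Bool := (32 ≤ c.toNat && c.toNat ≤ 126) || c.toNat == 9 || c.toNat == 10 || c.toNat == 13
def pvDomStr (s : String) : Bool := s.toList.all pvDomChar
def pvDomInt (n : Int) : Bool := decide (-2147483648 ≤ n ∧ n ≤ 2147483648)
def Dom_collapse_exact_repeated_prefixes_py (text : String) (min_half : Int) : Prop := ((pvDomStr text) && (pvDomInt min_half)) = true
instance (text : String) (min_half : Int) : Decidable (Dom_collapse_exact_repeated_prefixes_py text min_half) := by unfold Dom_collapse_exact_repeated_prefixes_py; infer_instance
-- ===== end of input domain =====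

-- B replaces A's per-round rescan of every candidate half by whole-slice comparison with one
-- Z-function pass per round (t[:h] == t[h:2h] iff z[h] >= h); return values proved equal on Pre_.

-- ===== PORT A =====
-- inner `for half in range(n//2, min_half-1, -1): if t[:half]==t[half:2*half]: … break`
def pvA_find (t : List Char) : List Int → Option Int
  | [] => none
  | h :: rest =>
      if PySem.List.slice t none (some h) = PySem.List.slice t (some h) (some (2 * h))
      then some h else pvA_find t rest

def pvA_loop (min_half : Int) : Nat → List Char → List Char
  | 0, t => t
  | fuel + 1, t =>
      let n : Int := (t.length : Int)
      if n < min_half * 2 then t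
      else
        match pvA_find t (PySem.List.pyRange (PySem.Int.floordiv n 2) (min_half - 1) (-1)) with
        | none => t
        | some half =>
            pvA_loop min_half fuel
              (PySem.Chars.strip (PySem.List.slice t none (some half) ++ PySem.List.slice t (some (2 * half)) none))

def collapse_exact_repeated_prefixes_py (text : String) (min_half : Int) : String :=
  let t := PySem.Chars.strip text.toList
  String.ofList (pvA_loop min_half (t.length + 1) t)

-- ===== PORT B =====
-- `while i + zi < n and t[zi] == t[i+zi]: zi += 1`, then the z fold over `for i in range(1, n)`,
-- then `for half in range(min_half, n//2+1): if z[half] >= half: best = half`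
-- (all indices are in range for min_half ≥ 1, i.e. on Pre_; Nat indexing is exact there)
def pvLcpExt (t : List Char) (i : Nat) (zi : Nat) : Nat :=
  if i + zi < t.length ∧ t.getD zi ' ' = t.getD (i + zi) ' ' then pvLcpExt t i (zi + 1) else zi
termination_by t.length - (i + zi)
decreasing_by omega

def pvZStep (t : List Char) (st : List Nat × Nat × Nat) (i : Nat) : List Nat × Nat × Nat :=
  let z := st.1
  let l := st.2.1
  let r := st.2.2
  let zi0 := if i < r then min (r - i) (z.getD (i - l) 0) else 0
  let zi := pvLcpExt t i zi0
  let z' := z ++ [zi]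
  if r < i + zi then (z', i, i + zi) else (z', l, r)

def pvZ (t : List Char) : List Nat :=
  ((List.range' 1 (t.length - 1)).foldl (pvZStep t) ([0], 0, 0)).1

def pvBest (z : List Nat) (mh n : Nat) : Nat :=
  (List.range' mh (n / 2 + 1 - mh)).foldl (fun b h => if h ≤ z.getD h 0 then h else b) 0

def pvB_loop (min_half : Int) : Nat → List Char → List Char
  | 0, t => t
  | fuel + 1, t =>
      let n := t.length
      if (n : Int) < min_half * 2 then t
      else
        let z := pvZ t
        let best := pvBest z min_half.toNat n
        if best = 0 then t
        else pvB_loop min_half fuel (PySem.Chars.strip (t.take best ++ t.drop (2 * best)))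

def collapse_exact_repeated_prefixes_py_alt (text : String) (min_half : Int) : String :=
  let t := PySem.Chars.strip text.toList
  String.ofList (pvB_loop min_half (t.length + 1) t)

-- ===== PRECONDITION & SPEC =====
-- Pre_ excludes min_half ≤ 0, on which Python A never returns: half = 0 always "matches" and
-- leaves t unchanged, so A's while-loop runs forever (the fuelled ports are exact on Pre_).
def Pre_collapse_exact_repeated_prefixes_py (text : String) (min_half : Int) : Prop := 1 ≤ min_half
instance (text : String) (min_half : Int) : Decidable (Pre_collapse_exact_repeated_prefixes_py text min_half) := by unfold Pre_collapse_exact_repeated_prefixes_py; infer_instance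

def pvWitness_collapse_exact_repeated_prefixes_py : String × Int := ("spam spam ", 4)

def Spec_collapse_exact_repeated_prefixes_py (text : String) (min_half : Int) (out : String) : Prop := out = collapse_exact_repeated_prefixes_py_alt text min_half
instance (text : String) (min_half : Int) (out : String) : Decidable (Spec_collapse_exact_repeated_prefixes_py text min_half out) := by unfold Spec_collapse_exact_repeated_prefixes_py; infer_instance

-- ===== CLAIM (what is proved, stated in full; the proofs are below) =====
def Claim_equal_collapse_exact_repeated_prefixes_py : Prop := ∀ (text : String) (min_half : Int), Dom_collapse_exact_repeated_prefixes_py text min_half → Pre_collapse_exact_repeated_prefixes_py text min_half → Spec_collapse_exact_repeated_prefixes_py text min_half (collapse_exact_repeated_prefixes_py text min_half)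

-- ===== LEMMAS AND PROOFS =====

-- longest common prefix length of two lists
def pvLcp : List Char → List Char → Nat
  | a :: as, b :: bs => if a = b then pvLcp as bs + 1 else 0
  | _, _ => 0

theorem pvLcp_le_right (a b : List Char) : pvLcp a b ≤ b.length := by
  induction a generalizing b with
  | nil => simp [pvLcp]
  | cons x xs ih =>
      cases b with
      | nil => simp [pvLcp]
      | cons y ys => simp only [pvLcp, List.length_cons]; split <;> simp <;> exact ih ys

theorem take_eq_of_le_pvLcp {a b : List Char} {k : Nat} (h : k ≤ pvLcp a b) :
    a.take k = b.take k := by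
  induction a generalizing b k with
  | nil =>
      cases b <;> simp [pvLcp] at h <;> simp [h]
  | cons x xs ih =>
      cases b with
      | nil => simp [pvLcp] at h; simp [h]
      | cons y ys =>
          cases k with
          | zero => simp
          | succ k =>
              simp only [pvLcp] at h
              by_cases hxy : x = y
              · simp [hxy] at h ⊢
                exact ih h
              · simp [hxy] at h

theorem le_pvLcp_of_take_eq {a b : List Char} {k : Nat} (hk : k ≤ a.length)
    (h : a.take k = b.take k) : k ≤ pvLcp a b := by
  induction a generalizing b k with
  | nil => cases b <;> simp_all [pvLcp]
  | cons x xs ih =>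
      cases k with
      | zero => exact Nat.zero_le _
      | succ k =>
          cases b with
          | nil => simp at h
          | cons y ys =>
              simp only [List.take_succ_cons, List.cons.injEq] at h
              simp only [pvLcp, h.1, if_pos rfl]
              exact Nat.succ_le_succ (ih (by simpa using hk) h.2)

theorem getD_eq_of_take_succ_eq {a b : List Char} {m : Nat} (ha : m < a.length)
    (hb : m < b.length) (h : a.take (m+1) = b.take (m+1)) : a.getD m ' ' = b.getD m ' ' := by
  have := congrArg (fun l => l.getD m ' ') h
  simpa [List.getD_eq_getElem?_getD, List.getElem?_take, ha, hb] using this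

theorem take_succ_eq_of_take_eq {a b : List Char} {m : Nat} (ha : m < a.length)
    (hb : m < b.length) (h : a.take m = b.take m) (hc : a.getD m ' ' = b.getD m ' ') :
    a.take (m+1) = b.take (m+1) := by
  rw [List.take_succ, List.take_succ, h]
  congr 1
  rw [List.getElem?_eq_getElem ha, List.getElem?_eq_getElem hb]
  simpa [List.getD_eq_getElem?_getD, List.getElem?_eq_getElem, ha, hb] using hc

theorem drop_getD (t : List Char) (i m : Nat) (h : i + m < t.length) :
    (t.drop i).getD m ' ' = t.getD (i + m) ' ' := by
  rw [List.getD_eq_getElem?_getD, List.getD_eq_getElem?_getD, List.getElem?_drop]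

theorem pvLcpExt_eq (t : List Char) (i : Nat) : ∀ k m, t.length - (i + m) ≤ k →
    m ≤ t.length - i → t.take m = (t.drop i).take m →
    pvLcpExt t i m = pvLcp t (t.drop i) := by
  intro k
  induction k with
  | zero =>
      intro m hk hm hmatch
      rw [pvLcpExt, if_neg (by omega)]
      have h1 : m ≤ pvLcp t (t.drop i) := le_pvLcp_of_take_eq (by omega) hmatch
      have h2 : pvLcp t (t.drop i) ≤ (t.drop i).length := pvLcp_le_right _ _
      rw [List.length_drop] at h2
      omega
  | succ k ih =>
      intro m hk hm hmatch
      rw [pvLcpExt]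
      by_cases hcond : i + m < t.length ∧ t.getD m ' ' = t.getD (i + m) ' '
      · rw [if_pos hcond]
        have hmlen : m < t.length := by omega
        have hmdlen : m < (t.drop i).length := by rw [List.length_drop]; omega
        have hgd : t.getD m ' ' = (t.drop i).getD m ' ' := by
          rw [drop_getD t i m hcond.1]; exact hcond.2
        exact ih (m+1) (by omega) (by omega)
          (take_succ_eq_of_take_eq hmlen hmdlen hmatch hgd)
      · rw [if_neg hcond]
        have h1 : m ≤ pvLcp t (t.drop i) := le_pvLcp_of_take_eq (by omega) hmatch
        by_cases hend : i + m < t.length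
        · -- mismatch
          have hne : t.getD m ' ' ≠ t.getD (i + m) ' ' := fun hc => hcond ⟨hend, hc⟩
          by_contra hne2
          have hlt : m < pvLcp t (t.drop i) := by omega
          have htk : t.take (m+1) = (t.drop i).take (m+1) := take_eq_of_le_pvLcp hlt
          have := getD_eq_of_take_succ_eq (a := t) (b := t.drop i) (by omega)
            (by rw [List.length_drop]; omega) htk
          rw [drop_getD t i m hend] at this
          exact hne this
        · have h2 : pvLcp t (t.drop i) ≤ (t.drop i).length := pvLcp_le_right _ _
          rw [List.length_drop] at h2
          omega

theorem take_drop_eq_of_take_eq {u v : List Char} {N d m : Nat}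
    (h : u.take N = v.take N) (hdm : d + m ≤ N) :
    (u.drop d).take m = (v.drop d).take m := by
  have h2 : u.take (d+m) = v.take (d+m) := by
    have := congrArg (List.take (d+m)) h
    simpa [List.take_take, Nat.min_eq_left hdm] using this
  have hu : (u.take (d+m)).drop d = (u.drop d).take m := by
    rw [List.drop_take]; congr 1; omega
  have hv : (v.take (d+m)).drop d = (v.drop d).take m := by
    rw [List.drop_take]; congr 1; omega
  rw [← hu, ← hv, h2]

def pvZInv (t : List Char) (i : Nat) (st : List Nat × Nat × Nat) : Prop :=
  st.1.length = i ∧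
  (∀ j, 1 ≤ j → j < i → st.1.getD j 0 = pvLcp t (t.drop j)) ∧
  st.2.1 ≤ st.2.2 ∧ st.2.2 ≤ t.length ∧
  (st.2.1 = 0 → st.2.2 = 0) ∧
  (1 ≤ st.2.1 → st.2.1 < i ∧ st.2.2 - st.2.1 ≤ pvLcp t (t.drop st.2.1))

theorem pvZStep_inv (t : List Char) (i : Nat) (st : List Nat × Nat × Nat)
    (hinv : pvZInv t i st) (hi1 : 1 ≤ i) (hin : i < t.length) :
    pvZInv t (i + 1) (pvZStep t st i) := by
  obtain ⟨z, l, r⟩ := st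
  obtain ⟨hlen, hz, hlr, hrn, hl0, hl1⟩ := hinv
  dsimp only at hlen hz hlr hrn hl0 hl1
  unfold pvZStep
  dsimp only
  set m := (if i < r then min (r - i) (z.getD (i - l) 0) else 0) with hmdef
  have hmfacts : m ≤ t.length - i ∧ t.take m = (t.drop i).take m := by
    by_cases hir : i < r
    · have hl : 1 ≤ l := by
        rcases Nat.eq_zero_or_pos l with h0 | h1
        · have := hl0 h0; omega
        · exact h1
      obtain ⟨hli, hwin⟩ := hl1 hl
      have hk : z.getD (i - l) 0 = pvLcp t (t.drop (i - l)) := hz (i - l) (by omega) (by omega)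
      have hm1 : m ≤ r - i := by rw [hmdef, if_pos hir]; omega
      have hm2 : m ≤ pvLcp t (t.drop (i - l)) := by rw [hmdef, if_pos hir, hk]; omega
      refine ⟨by omega, ?_⟩
      have step1 : t.take m = (t.drop (i - l)).take m := take_eq_of_le_pvLcp hm2
      have hwtake : t.take (r - l) = (t.drop l).take (r - l) :=
        take_eq_of_le_pvLcp hwin
      have step2 : (t.drop (i - l)).take m = (t.drop i).take m := by
        have h4 := take_drop_eq_of_take_eq (d := i - l) (m := m) hwtake (by omega)
        have h3 : l + (i - l) = i := by omega
        rwa [List.drop_drop, h3] at h4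
      rw [step1, step2]
    · rw [hmdef, if_neg hir]; simp
  set zi := pvLcpExt t i m with hzidef
  have hzi : zi = pvLcp t (t.drop i) :=
    pvLcpExt_eq t i t.length m (by omega) hmfacts.1 hmfacts.2
  have hzile : zi ≤ t.length - i := by
    have := pvLcp_le_right t (t.drop i)
    rw [List.length_drop] at this; omega
  have hentry : ∀ j, 1 ≤ j → j < i + 1 → (z ++ [zi]).getD j 0 = pvLcp t (t.drop j) := by
    intro j hj1 hj2
    rcases Nat.lt_or_ge j i with hji | hji
    · rw [List.getD_append _ _ _ _ (by omega)]
      exact hz j hj1 hji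
    · have hjeq : j = i := by omega
      subst hjeq
      have : (z ++ [zi]).getD j 0 = zi := by
        rw [List.getD_eq_getElem?_getD, List.getElem?_append_right (by omega)]
        simp [hlen]
      rw [this, hzi]
  split_ifs with hupd
  · unfold pvZInv
    dsimp only
    exact ⟨by simp [hlen], hentry, by omega, by omega, by omega, fun _ => ⟨by omega, by rw [hzi]; omega⟩⟩
  · unfold pvZInv
    dsimp only
    refine ⟨by simp [hlen], hentry, hlr, hrn, hl0, fun hl => ?_⟩
    obtain ⟨h1, h2⟩ := hl1 hl
    exact ⟨by omega, h2⟩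

theorem pvZ_fold_inv (t : List Char) : ∀ k, k ≤ t.length - 1 →
    pvZInv t (1 + k) ((List.range' 1 k).foldl (pvZStep t) ([0], 0, 0)) := by
  intro k
  induction k with
  | zero =>
      intro _
      show pvZInv t 1 ([0], 0, 0)
      unfold pvZInv
      dsimp only
      refine ⟨rfl, ?_, le_refl _, Nat.zero_le _, fun _ => rfl, fun h => by omega⟩
      intro j hj1 hj2; omega
  | succ k ih =>
      intro hk
      rw [List.range'_concat, List.foldl_append, List.foldl_cons, List.foldl_nil,
        Nat.one_mul, ← Nat.add_assoc]
      exact pvZStep_inv t (1 + k) _ (ih (by omega)) (by omega) (by omega)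

theorem pvZ_spec (t : List Char) : ∀ h, 1 ≤ h → h < t.length →
    (pvZ t).getD h 0 = pvLcp t (t.drop h) := by
  intro h h1 h2
  have := pvZ_fold_inv t (t.length - 1) (le_refl _)
  unfold pvZ
  exact this.2.1 h h1 (by omega)

theorem find?_congr {α : Type} (l : List α) (p q : α → Bool)
    (h : ∀ x ∈ l, p x = q x) : l.find? p = l.find? q := by
  induction l with
  | nil => rfl
  | cons x xs ih =>
      rw [List.find?_cons, List.find?_cons, h x (List.mem_cons_self)]
      cases q x with
      | true => rfl
      | false => exact ih (fun y hy => h y (List.mem_cons_of_mem _ hy))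

theorem foldl_keepLast_eq_find_reverse (l : List Nat) (p : Nat → Prop) [DecidablePred p] (b0 : Nat) :
    l.foldl (fun b h => if p h then h else b) b0 =
      (l.reverse.find? (fun h => decide (p h))).getD b0 := by
  induction l generalizing b0 with
  | nil => rfl
  | cons x xs ih =>
      rw [List.foldl_cons, ih, List.reverse_cons, List.find?_append]
      cases hfind : xs.reverse.find? (fun h => decide (p h)) with
      | some y => simp
      | none =>
          by_cases hx : p x <;> simp [hx]

theorem pvA_find_eq_find? (t : List Char) (lst : List Int) :
    pvA_find t lst = lst.find? (fun h =>
      decide (PySem.List.slice t none (some h) = PySem.List.slice t (some h) (some (2 * h)))) := by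
  induction lst with
  | nil => rfl
  | cons x xs ih =>
      rw [pvA_find, List.find?_cons]
      by_cases hc : PySem.List.slice t none (some x) = PySem.List.slice t (some x) (some (2 * x))
      · simp [hc]
      · simp [hc, ih]

theorem pv_match_iff (t : List Char) (h' : Nat) (h1 : 1 ≤ h') (h2 : h' < t.length) :
    (h' ≤ (pvZ t).getD h' 0) ↔ t.take h' = (t.drop h').take h' := by
  rw [pvZ_spec t h' h1 h2]
  constructor
  · exact take_eq_of_le_pvLcp
  · exact le_pvLcp_of_take_eq (by omega)

theorem pv_round_eq (t : List Char) (min_half : Int) (h1 : 1 ≤ min_half)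
    (hn : ¬ ((t.length : Int) < min_half * 2)) :
    pvA_find t (PySem.List.pyRange (PySem.Int.floordiv (t.length : Int) 2) (min_half - 1) (-1)) =
    (if pvBest (pvZ t) min_half.toNat t.length = 0 then none
     else some ((pvBest (pvZ t) min_half.toNat t.length : Nat) : Int)) := by
  have hmh1 : 1 ≤ min_half.toNat := by omega
  have h2n : 2 * min_half.toNat ≤ t.length := by omega
  set n := t.length with hn0
  set mh := min_half.toNat with hmh
  set K := n / 2 + 1 - mh with hK
  set ascN : List Nat := (List.range K).map (fun k => mh + k) with hascN
  set pN : Nat → Bool := fun h => decide (t.take h = (t.drop h).take h) with hpN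
  have hmem : ∀ x ∈ ascN.reverse, mh ≤ x ∧ x ≤ n / 2 := by
    intro x hx
    have hx2 := List.mem_reverse.mp hx
    rw [hascN, List.mem_map] at hx2
    obtain ⟨k, hk, rfl⟩ := hx2
    rw [List.mem_range] at hk
    omega
  have hfd : PySem.Int.floordiv (n : Int) 2 = ((n / 2 : Nat) : Int) := by
    exact_mod_cast PySem.Int.floordiv_natCast n 2
  have hlist : PySem.List.pyRange (PySem.Int.floordiv (n : Int) 2) (min_half - 1) (-1)
      = (PySem.List.pyRange (mh : Int) (((n / 2 : Nat) : Int) + 1) 1).reverse := by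
    rw [hfd, PySem.List.pyRange_neg_one_eq_reverse]
    congr 2
    omega
  have hasc : PySem.List.pyRange (mh : Int) (((n / 2 : Nat) : Int) + 1) 1
      = ascN.map (fun h : Nat => (h : Int)) := by
    apply List.ext_getElem
    · rw [PySem.List.length_pyRange_one]
      simp [hascN]
      omega
    · intro i hi1 hi2
      rw [PySem.List.getElem_pyRange_one]
      simp [hascN]
      try push_cast
      try ring
      try omega
  have hA : pvA_find t (PySem.List.pyRange (PySem.Int.floordiv (n : Int) 2) (min_half - 1) (-1))
      = ((ascN.reverse.find? pN).map (fun h : Nat => (h : Int))) := by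
    rw [pvA_find_eq_find?, hlist, hasc, ← List.map_reverse, List.find?_map]
    congr 1
    apply find?_congr
    intro x _
    simp only [Function.comp, hpN]
    have hcast2 : (2 : Int) * ((x : Nat) : Int) = (((2 * x : Nat)) : Int) := by push_cast; ring
    rw [hcast2, PySem.List.slice_to_natCast, PySem.List.slice_natCast]
    have h2x : 2 * x - x = x := by omega
    rw [h2x]
  have hB : pvBest (pvZ t) mh n = ((ascN.reverse.find? pN).getD 0) := by
    rw [pvBest, List.range'_eq_map_range,
      foldl_keepLast_eq_find_reverse _ (fun h => h ≤ (pvZ t).getD h 0) 0]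
    congr 1
    apply find?_congr
    intro x hx
    have hb := hmem x hx
    rw [hpN]
    rw [decide_eq_decide]
    exact pv_match_iff t x (by omega) (by omega)
  rw [hA, hB]
  cases hf : ascN.reverse.find? pN with
  | none => simp
  | some x =>
      have hxmem := List.mem_of_find?_eq_some hf
      have hb := hmem x hxmem
      simp only [Option.map_some, Option.getD_some]
      rw [if_neg (by omega)]

theorem pv_loop_eq (min_half : Int) (h1 : 1 ≤ min_half) :
    ∀ fuel t, pvA_loop min_half fuel t = pvB_loop min_half fuel t := by
  intro fuel
  induction fuel with
  | zero => intro t; rfl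
  | succ fuel ih =>
      intro t
      rw [pvA_loop, pvB_loop]
      dsimp only
      by_cases hc : (t.length : Int) < min_half * 2
      · rw [if_pos hc, if_pos hc]
      · rw [if_neg hc, if_neg hc, pv_round_eq t min_half h1 hc]
        by_cases hb : pvBest (pvZ t) min_half.toNat t.length = 0
        · rw [if_pos hb, if_pos hb]
        · rw [if_neg hb, if_neg hb]
          dsimp only
          set best := pvBest (pvZ t) min_half.toNat t.length with hbest
          have hcast2 : (2 : Int) * ((best : Nat) : Int) = (((2 * best : Nat)) : Int) := by
            push_cast; ring
          rw [hcast2, PySem.List.slice_to_natCast, PySem.List.slice_from_natCast]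
          exact ih _

-- ===== VERDICT (by name: the statement is the Claim_ definition above) =====
theorem collapse_exact_repeated_prefixes_py_spec : Claim_equal_collapse_exact_repeated_prefixes_py := by
  intro text min_half _ hpre
  unfold Spec_collapse_exact_repeated_prefixes_py collapse_exact_repeated_prefixes_py collapse_exact_repeated_prefixes_py_alt
  simp only [pv_loop_eq min_half hpre]
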